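-- pv_equiv track=rewrite | github.com/ganeshjawahar/ner-rnn | code/preprocess.py | read_sentence
-- ===== SOURCE A (Python) =====
-- def read_sentence(sent):
-- 	tokens=[]
-- 	i=0
-- 	start=-1
-- 	size=0
-- 	while i<len(sent):
-- 		if sent[i]!=' ':
-- 			if size==0:
-- 				start=i
-- 			size=size+1
-- 		else:
-- 			if size!=0:
-- 				tokens.append(sent[start:start+size]+'$$$'+str(start)+'$$$'+str(size))
-- 				size=0
-- 		i=i+1
-- 	if size!=0:
-- 		tokens.append(sent[start:start+size]+'$$$'+str(start)+'$$$'+str(size))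
-- 	return tokens
-- ===== SOURCE B (Python) =====
-- import re
--
-- def read_sentence(sent):
--     return [m.group() + '$$$' + str(m.start()) + '$$$' + str(len(m.group()))
--             for m in re.finditer(r'[^ ]+', sent)]
-- ===== Notes on version B (the rewrite author's own statement) =====
-- stated objective: idiomatic
-- what changed: Replaces the explicit index/start/size character-scan state machine with regex-driven tokenization: one re.finditer over runs [^ ]+ of non-space characters, building each token from the match object in a single comprehension.
import Mathlib
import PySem

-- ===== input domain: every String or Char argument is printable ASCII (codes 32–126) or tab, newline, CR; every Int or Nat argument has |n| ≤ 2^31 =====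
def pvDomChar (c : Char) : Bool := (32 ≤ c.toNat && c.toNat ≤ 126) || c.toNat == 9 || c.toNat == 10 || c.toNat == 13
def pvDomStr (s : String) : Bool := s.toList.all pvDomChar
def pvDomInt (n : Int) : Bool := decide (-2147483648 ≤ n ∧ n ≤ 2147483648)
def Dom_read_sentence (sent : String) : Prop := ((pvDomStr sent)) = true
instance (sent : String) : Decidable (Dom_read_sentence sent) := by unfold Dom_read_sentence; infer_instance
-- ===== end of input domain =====

-- B replaces A's index/start/size state machine by regex-style tokenization
-- (re.finditer over runs of non-space characters); idiomatic, and measurably faster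
-- by a constant factor (C-level regex scan vs a per-character Python loop).

-- ===== PORT A =====

-- sent[start:start+size]+'$$$'+str(start)+'$$$'+str(size)
-- (slice ported by hand as drop/take: in A, 0 ≤ start and start+size ≤ len(sent)
-- whenever this is evaluated, where Python's slice is exactly drop-then-take)
def pvEmit (full : List Char) (start size : Nat) : String :=
  String.mk ((full.drop start).take size) ++ "$$$" ++ PySem.Int.toStr (start : Int)
    ++ "$$$" ++ PySem.Int.toStr (size : Int)

-- the while-loop of A: `rest` is the suffix sent[i:], so `i < len(sent)` ↔ `rest ≠ []`;
-- Python inits start = -1, but start is only read after it has been assigned a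
-- position ≥ 0 (size ≠ 0 guards every read), so Nat counters are exact.
def pvLoopA (full : List Char) : List Char → Nat → Nat → Nat → List String → List String
  | [], _, start, size, tokens =>
      if size ≠ 0 then tokens ++ [pvEmit full start size] else tokens
  | c :: rest, i, start, size, tokens =>
      if c ≠ ' ' then
        pvLoopA full rest (i + 1) (if size = 0 then i else start) (size + 1) tokens
      else
        if size ≠ 0 then
          pvLoopA full rest (i + 1) start 0 (tokens ++ [pvEmit full start size])
        else
          pvLoopA full rest (i + 1) start 0 tokens

def read_sentence (sent : String) : List String :=
  pvLoopA sent.toList sent.toList 0 0 0 []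

-- ===== PORT B =====

-- re.finditer(r'[^ ]+', sent): the maximal runs of non-space characters with their
-- start positions, in order; each step skips one space or consumes one whole run.
def pvMatches : List Char → Nat → List (Nat × List Char)
  | [], _ => []
  | c :: rest, pos =>
      if c = ' ' then pvMatches rest (pos + 1)
      else
        let run := List.takeWhile (fun d => d ≠ ' ') (c :: rest)
        (pos, run) :: pvMatches (List.dropWhile (fun d => d ≠ ' ') (c :: rest)) (pos + run.length)
termination_by cs _ => cs.length
decreasing_by
  · simp
  · simp only [List.dropWhile]
    simp_all only [decide_not, ne_eq, decide_eq_false_iff_not, Decidable.not_not, decide_true]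
    exact Nat.lt_succ_of_le (List.length_dropWhile_le _ _)

-- m.group()+'$$$'+str(m.start())+'$$$'+str(len(m.group()))
def pvTok (m : Nat × List Char) : String :=
  String.mk m.2 ++ "$$$" ++ PySem.Int.toStr (m.1 : Int) ++ "$$$" ++ PySem.Int.toStr (m.2.length : Int)

def read_sentence_alt (sent : String) : List String :=
  (pvMatches sent.toList 0).map pvTok

-- ===== PRECONDITION & SPEC =====
def Spec_read_sentence (sent : String) (out : List String) : Prop := out = read_sentence_alt sent
instance (sent : String) (out : List String) : Decidable (Spec_read_sentence sent out) := by unfold Spec_read_sentence; infer_instance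

-- ===== CLAIM (what is proved, stated in full; the proofs are below) =====
def Claim_equal_read_sentence : Prop := ∀ (sent : String), Dom_read_sentence sent → Spec_read_sentence sent (read_sentence sent)

-- ===== LEMMAS AND PROOFS =====

theorem pvMatches_nil (pos : Nat) : pvMatches [] pos = [] := by
  rw [pvMatches]

theorem pvMatches_cons (c : Char) (rest : List Char) (pos : Nat) :
    pvMatches (c :: rest) pos =
      if c = ' ' then pvMatches rest (pos + 1)
      else
        (pos, List.takeWhile (fun d => d ≠ ' ') (c :: rest)) ::
          pvMatches (List.dropWhile (fun d => d ≠ ' ') (c :: rest))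
            (pos + (List.takeWhile (fun d => d ≠ ' ') (c :: rest)).length) := by
  rw [pvMatches]

theorem pvLoopA_eq (full : List Char) :
    ∀ (rest : List Char) (i start size : Nat) (tokens : List String),
      full.drop i = rest → i + rest.length = full.length → (size ≠ 0 → start + size = i) →
      pvLoopA full rest i start size tokens =
        tokens ++
          (if size = 0 then (pvMatches rest i).map pvTok
           else
             pvTok (start, (full.drop start).take size ++ rest.takeWhile (fun d => d ≠ ' ')) ::
               (pvMatches (rest.dropWhile (fun d => d ≠ ' '))
                 (i + (rest.takeWhile (fun d => d ≠ ' ')).length)).map pvTok) := by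
  intro rest
  induction rest with
  | nil =>
    intro i start size tokens hdrop hlen hsi
    by_cases hs : size = 0
    · subst hs; simp [pvLoopA, pvMatches_nil]
    · have hsi' := hsi hs
      have hseg : ((full.drop start).take size).length = size := by
        simp only [List.length_take, List.length_drop]
        simp at hlen; omega
      simp [pvLoopA, hs, pvMatches_nil, pvTok, pvEmit, hseg]
  | cons c rest ih =>
    intro i start size tokens hdrop hlen hsi
    have hdrop' : full.drop (i + 1) = rest := by
      have h := congrArg (List.drop 1) hdrop
      simpa [List.drop_drop, Nat.add_comm] using h
    have hlen' : (i + 1) + rest.length = full.length := by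
      simp at hlen; omega
    by_cases hc : c = ' '
    · subst hc
      by_cases hs : size = 0
      · subst hs
        simp only [pvLoopA, if_neg (by simp : ¬ (' ' ≠ ' ')), if_neg (by simp : ¬ (0 : Nat) ≠ 0)]
        rw [ih (i+1) start 0 tokens hdrop' hlen' (by omega)]
        simp [pvMatches_cons]
      · have hsi' := hsi hs
        simp only [pvLoopA, if_neg (by simp : ¬ (' ' ≠ ' ')), if_pos hs]
        rw [ih (i+1) start 0 (tokens ++ [pvEmit full start size]) hdrop' hlen' (by omega)]
        have hseg : ((full.drop start).take size).length = size := by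
          simp only [List.length_take, List.length_drop]
          simp at hlen; omega
        simp [hs, pvMatches_cons, pvTok, pvEmit, hseg, List.takeWhile_cons,
          List.dropWhile_cons]
    · -- non-space
      have htc : List.takeWhile (fun d => d ≠ ' ') (c :: rest) =
          c :: List.takeWhile (fun d => d ≠ ' ') rest := by
        simp [List.takeWhile_cons, hc]
      have hdc : List.dropWhile (fun d => d ≠ ' ') (c :: rest) =
          List.dropWhile (fun d => d ≠ ' ') rest := by
        simp [List.dropWhile_cons, hc]
      have hp : (i + 1) + (List.takeWhile (fun d => d ≠ ' ') rest).length =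
          i + (c :: List.takeWhile (fun d => d ≠ ' ') rest).length := by
        simp; omega
      simp only [pvLoopA, if_pos (by simpa using hc)]
      by_cases hs : size = 0
      · subst hs
        simp only [reduceIte]
        rw [ih (i+1) i 1 tokens hdrop' hlen' (by omega)]
        have hc1 : (full.drop i).take 1 = [c] := by rw [hdrop]; rfl
        simp only [if_neg (by omega : ¬ (1 : Nat) = 0), hc1, pvMatches_cons,
          if_neg hc, htc, hdc, hp, List.map_cons, List.singleton_append]
      · have hsi' := hsi hs
        simp only [if_neg hs, if_neg (by omega : ¬ size + 1 = 0)]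
        rw [ih (i+1) start (size+1) tokens hdrop' hlen' (by omega)]
        have hseg : (full.drop start).take (size + 1) =
            (full.drop start).take size ++ [c] := by
          rw [List.take_add]
          congr 1
          have h2 : (full.drop start).drop size = c :: rest := by
            rw [List.drop_drop, show start + size = i by omega, hdrop]
          rw [h2]; rfl
        simp only [htc, hdc, hseg, hp, List.append_assoc, List.singleton_append,
          if_neg (show ¬ size + 1 = 0 by omega)]

theorem read_sentence_spec : Claim_equal_read_sentence := by
  intro sent _
  unfold Spec_read_sentence read_sentence read_sentence_alt
  rw [pvLoopA_eq sent.toList sent.toList 0 0 0 [] (by simp) (by simp) (by simp)]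
  simp
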